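-- pv_equiv track=rewrite | github.com/wonghorngwoei/FYP_TP055241 | website/views.py | format_opening_hours
-- ===== SOURCE A (Python) =====
-- def format_opening_hours(opening_hours):
--     days = ['Monday', 'Tuesday', 'Wednesday', 'Thursday', 'Friday', 'Saturday', 'Sunday']
--     opening_hours_formatted = []
--
--     for day in days:
--         for hours in opening_hours:
--             if day in hours:
--                 opening_hours_formatted.append(f'{day}: {hours.split(": ")[1]}')
--                 break
--         else:
--             opening_hours_formatted.append(f'{day}: Closed')
--
--     opening_hours_formatted_final = '\n'.join(opening_hours_formatted)
--     return opening_hours_formatted_final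
-- ===== SOURCE B (Python) =====
-- def format_opening_hours(opening_hours):
--     days = ['Monday', 'Tuesday', 'Wednesday', 'Thursday', 'Friday', 'Saturday', 'Sunday']
--     first_match = {}
--     for hours in opening_hours:
--         for day in days:
--             if day in hours and day not in first_match:
--                 first_match[day] = hours
--     lines = []
--     for day in days:
--         if day in first_match:
--             lines.append(f'{day}: {first_match[day].split(": ")[1]}')
--         else:
--             lines.append(f'{day}: Closed')
--     return '\n'.join(lines)
-- ===== Notes on version B (the rewrite author's own statement) =====
-- stated objective: alternative
-- what changed: Instead of scanning opening_hours afresh for each of the 7 days with a break/else inner loop, B makes one pass over opening_hours building a dict from each day name to its first matching string, then formats the 7-day list from that dict.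
import Mathlib
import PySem

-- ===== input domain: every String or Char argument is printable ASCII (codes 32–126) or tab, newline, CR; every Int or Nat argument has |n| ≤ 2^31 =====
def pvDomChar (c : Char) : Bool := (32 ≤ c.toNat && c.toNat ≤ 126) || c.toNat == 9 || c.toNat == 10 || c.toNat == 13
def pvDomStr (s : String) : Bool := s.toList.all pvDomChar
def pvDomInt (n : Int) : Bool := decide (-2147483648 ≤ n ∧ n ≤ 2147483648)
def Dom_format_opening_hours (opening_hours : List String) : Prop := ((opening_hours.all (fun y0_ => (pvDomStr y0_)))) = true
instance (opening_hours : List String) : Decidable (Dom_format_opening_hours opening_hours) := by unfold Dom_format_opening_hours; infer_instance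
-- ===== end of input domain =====

-- B builds a day → first-matching-string dict in one pass over opening_hours instead of
-- A's per-day scan of opening_hours; same output, alternative decomposition (no speed claim).

def pvDays : List String :=
  ["Monday", "Tuesday", "Wednesday", "Thursday", "Friday", "Saturday", "Sunday"]

-- f'{day}: {hours.split(": ")[1]}'; the .getD "" totalizes the IndexError case, excluded by Pre_
def pvFmt (day hours : String) : String :=
  day ++ ": " ++ (PySem.List.pyGet? ((PySem.Str.split? hours ": ").getD []) 1).getD ""

-- ===== PORT A =====
-- A's inner 'for hours in opening_hours: … break / else:' loop
def pvALine (day : String) : List String → String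
  | [] => day ++ ": Closed"
  | h :: rest =>
      if PySem.Str.isIn day h then pvFmt day h else pvALine day rest

def format_opening_hours (opening_hours : List String) : String :=
  let formatted := pvDays.foldl (fun acc day => acc ++ [pvALine day opening_hours]) []
  PySem.Str.join "\n" formatted

-- ===== PORT B =====
-- first pass: for hours in opening_hours: for day in days: if day in hours and day not in first_match: …
def pvBuild (opening_hours : List String) : PySem.Dict String String :=
  opening_hours.foldl
    (fun d h =>
      pvDays.foldl
        (fun d day =>
          if PySem.Str.isIn day h && !(d.contains day) then d.insert day h else d)
        d)
    PySem.Dict.empty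

def format_opening_hours_alt (opening_hours : List String) : String :=
  let first_match := pvBuild opening_hours
  let lines := pvDays.foldl
    (fun acc day =>
      acc ++ [if first_match.contains day then pvFmt day (first_match.getD day "")
              else day ++ ": Closed"])
    []
  PySem.Str.join "\n" lines

-- ===== PRECONDITION & SPEC =====
-- Pre_ excludes inputs where, for some weekday, the FIRST opening_hours entry containing that
-- day name lacks the substring ": " — there Python A (and B) raise IndexError on split(": ")[1].
def Pre_format_opening_hours (opening_hours : List String) : Prop :=
  ∀ day ∈ pvDays,
    (opening_hours.find? (fun h => PySem.Str.isIn day h)).all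
      (fun h => PySem.Str.isIn ": " h) = true
instance (opening_hours : List String) : Decidable (Pre_format_opening_hours opening_hours) := by
  unfold Pre_format_opening_hours; infer_instance

def pvWitness_format_opening_hours : List String :=
  ["Monday: 9am-5pm", "Friday: Closed"]

def Spec_format_opening_hours (opening_hours : List String) (out : String) : Prop := out = format_opening_hours_alt opening_hours
instance (opening_hours : List String) (out : String) : Decidable (Spec_format_opening_hours opening_hours out) := by unfold Spec_format_opening_hours; infer_instance

-- ===== CLAIM (what is proved, stated in full; the proofs are below) =====
def Claim_equal_format_opening_hours : Prop := ∀ (opening_hours : List String), Dom_format_opening_hours opening_hours → Pre_format_opening_hours opening_hours → Spec_format_opening_hours opening_hours (format_opening_hours opening_hours)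

-- ===== LEMMAS AND PROOFS =====

-- the inner 7-day fold leaves keys not in ds untouched
theorem pvInner_get?_not_mem (h : String) (day : String) :
    ∀ (ds : List String) (d : PySem.Dict String String), day ∉ ds →
      (ds.foldl
        (fun d dy => if PySem.Str.isIn dy h && !(d.contains dy) then d.insert dy h else d)
        d).get? day = d.get? day := by
  intro ds
  induction ds with
  | nil => intro d _; rfl
  | cons dy t ih =>
      intro d hnm
      simp only [List.mem_cons, not_or] at hnm
      simp only [List.foldl_cons]
      rw [ih _ hnm.2]
      split_ifs with hc
      · exact PySem.Dict.get?_insert_of_ne d h hnm.1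
      · rfl

-- after the inner 7-day fold, key 'day' holds h iff h mentions day and day was absent
theorem pvInner_get?_mem (h : String) (day : String) :
    ∀ (ds : List String) (d : PySem.Dict String String), ds.Nodup → day ∈ ds →
      (ds.foldl
        (fun d dy => if PySem.Str.isIn dy h && !(d.contains dy) then d.insert dy h else d)
        d).get? day =
      if PySem.Str.isIn day h && !(d.contains day) then some h else d.get? day := by
  intro ds
  induction ds with
  | nil => intro d _ hm; cases hm
  | cons dy t ih =>
      intro d hnd hm
      simp only [List.nodup_cons] at hnd
      simp only [List.foldl_cons]
      rcases List.mem_cons.mp hm with rfl | hmt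
      · rw [pvInner_get?_not_mem h day t _ hnd.1]
        split_ifs with hc
        · exact PySem.Dict.get?_insert_self d day h
        · rfl
      · have hne : day ≠ dy := fun he => hnd.1 (he ▸ hmt)
        by_cases hc : (PySem.Str.isIn dy h && !(d.contains dy)) = true
        · rw [if_pos hc, ih _ hnd.2 hmt, PySem.Dict.get?_insert_of_ne d h hne]
          have hcc : (d.insert dy h).contains day = d.contains day := by
            rw [PySem.Dict.contains_eq_isSome_get?, PySem.Dict.contains_eq_isSome_get?,
              PySem.Dict.get?_insert_of_ne d h hne]
          rw [hcc]
        · rw [if_neg hc, ih _ hnd.2 hmt]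

theorem pvDays_nodup : pvDays.Nodup := by decide

-- the dict built by B holds, for each weekday, the first matching string
theorem pvBuild_get? (day : String) (hday : day ∈ pvDays) :
    ∀ (xs : List String) (d : PySem.Dict String String),
      (xs.foldl
        (fun d h =>
          pvDays.foldl
            (fun d dy => if PySem.Str.isIn dy h && !(d.contains dy) then d.insert dy h else d)
            d)
        d).get? day =
      if d.contains day then d.get? day
      else xs.find? (fun h => PySem.Str.isIn day h) := by
  intro xs
  induction xs with
  | nil =>
      intro d
      simp only [List.foldl_nil, List.find?_nil]
      split_ifs with hc
      · rfl
      · rw [PySem.Dict.contains_eq_isSome_get?] at hc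
        exact Option.not_isSome_iff_eq_none.mp (by simp [hc])
  | cons h t ih =>
      intro d
      simp only [List.foldl_cons]
      rw [ih]
      have hg := pvInner_get?_mem h day pvDays d pvDays_nodup hday
      have hcont : (pvDays.foldl
          (fun d dy => if PySem.Str.isIn dy h && !(d.contains dy) then d.insert dy h else d)
          d).contains day = ((if PySem.Str.isIn day h && !(d.contains day) then some h
            else d.get? day).isSome) := by
        rw [PySem.Dict.contains_eq_isSome_get?, hg]
      rw [hg, hcont, List.find?_cons]
      by_cases hc : d.contains day = true
      · have hg2 : (d.get? day).isSome = true := by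
          rw [PySem.Dict.contains_eq_isSome_get?] at hc; exact hc
        cases hin : PySem.Str.isIn day h <;> simp [hc, hg2]
      · have hnone : d.get? day = none := by
          rw [PySem.Dict.contains_eq_isSome_get?] at hc
          exact Option.not_isSome_iff_eq_none.mp (by simp [hc])
        simp only [PySem.Str.isIn_eq]
        by_cases hin : PySem.Chars.isIn day.toList h.toList = true <;>
          simp [hc, hnone, hin]

theorem foldl_append_singleton {α β : Type} (f : α → β) :
    ∀ (ds : List α) (acc : List β),
      ds.foldl (fun a x => a ++ [f x]) acc = acc ++ ds.map f := by
  intro ds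
  induction ds with
  | nil => intro acc; simp
  | cons x t ih => intro acc; simp [ih]

-- A's inner scan returns the line built from the first matching string
theorem pvALine_eq_find? (day : String) :
    ∀ xs : List String,
      pvALine day xs =
        match xs.find? (fun h => PySem.Str.isIn day h) with
        | some h => pvFmt day h
        | none => day ++ ": Closed" := by
  intro xs
  induction xs with
  | nil => rfl
  | cons h t ih =>
      rw [List.find?_cons]
      show (if PySem.Str.isIn day h then pvFmt day h else pvALine day t) = _
      simp only [PySem.Str.isIn_eq]
      by_cases hin : PySem.Chars.isIn day.toList h.toList = true <;> simp [hin, ih]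

-- ===== VERDICT (by name: the statement is the Claim_ definition above) =====
theorem format_opening_hours_spec : Claim_equal_format_opening_hours := by
  intro opening_hours _ _
  unfold Spec_format_opening_hours format_opening_hours format_opening_hours_alt
  simp only
  congr 1
  rw [foldl_append_singleton, foldl_append_singleton]
  simp only [List.nil_append]
  apply List.map_congr_left
  intro day hday
  have hget : (pvBuild opening_hours).get? day
      = opening_hours.find? (fun h => PySem.Str.isIn day h) := by
    have hb := pvBuild_get? day hday opening_hours PySem.Dict.empty
    rw [PySem.Dict.contains_empty, if_neg Bool.false_ne_true] at hb
    exact hb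
  have hcont : (pvBuild opening_hours).contains day
      = (opening_hours.find? (fun h => PySem.Str.isIn day h)).isSome := by
    rw [PySem.Dict.contains_eq_isSome_get?, hget]
  have hgd : (pvBuild opening_hours).getD day "" =
      (opening_hours.find? (fun h => PySem.Str.isIn day h)).getD "" := by
    rw [PySem.Dict.getD_eq_get?_getD, hget]
  rw [pvALine_eq_find? day opening_hours, hcont, hgd]
  cases hf : opening_hours.find? (fun h => PySem.Str.isIn day h) with
  | none => rfl
  | some h => rfl
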